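-- pv_equiv track=rewrite | github.com/LiangLiheng/LeetCodePro | 3757.number-of-effective-subsequences.py | countEffective
-- ===== SOURCE A (Python) =====
-- from typing import List
--
-- def countEffective(nums: List[int]) -> int:
--     MOD = 10**9 + 7
--     n = len(nums)
--     full_or = 0
--     for num in nums:
--         full_or |= num
--     # For each bit in full_or, find indices covering that bit
--     bit2indices = {}
--     for i in range(20):
--         if (full_or >> i) & 1:
--             bit2indices[i] = []
--     for idx, num in enumerate(nums):
--         for b in bit2indices:
--             if (num >> b) & 1:
--                 bit2indices[b].append(idx)
--     # We want to count subsets that contain at least one index from each bit's covering set (all bits in full_or)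
--     # Inclusion-Exclusion Principle over bits
--     from functools import reduce
--     ans = 0
--     bits = list(bit2indices.keys())
--     m = len(bits)
--     # For each non-empty subset of bits
--     for mask in range(1, 1 << m):
--         covered = set()
--         for j in range(m):
--             if (mask >> j) & 1:
--                 covered |= set(bit2indices[bits[j]])
--         cnt = pow(2, len(covered), MOD) - 1 # non-empty subsets of covered indices
--         # Inclusion-Exclusion: add if subset has odd number of bits, subtract if even
--         if bin(mask).count('1') % 2 == 1:
--             ans = (ans + cnt) % MOD
--         else:
--             ans = (ans - cnt) % MOD
--     return ans
-- ===== SOURCE B (Python) =====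
-- def countEffective(nums):
--     MOD = 10**9 + 7
--     full_or = 0
--     for num in nums:
--         full_or |= num
--     bits = [b for b in range(20) if (full_or >> b) & 1]
--     m = len(bits)
--     # one bitmask per element: which of the relevant bits it carries
--     masks = [sum(((num >> b) & 1) << j for j, b in enumerate(bits)) for num in nums]
--     ans = 0
--     for sub in range(1, 1 << m):
--         c = sum(1 for mu in masks if mu & sub)
--         term = pow(2, c, MOD) - 1
--         if bin(sub).count('1') % 2 == 1:
--             ans = ans + term
--         else:
--             ans = ans - term
--     return ans % MOD
-- ===== Notes on version B (the rewrite author's own statement) =====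
-- stated objective: faster
-- what changed: A materialises, for every non-empty subset of bits, the union of per-bit index sets as a Python set and takes its size; B precomputes one small bitmask per element and per subset just counts the elements whose bitmask intersects it (no per-bit index lists, no dict, no set unions).
import Mathlib
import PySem

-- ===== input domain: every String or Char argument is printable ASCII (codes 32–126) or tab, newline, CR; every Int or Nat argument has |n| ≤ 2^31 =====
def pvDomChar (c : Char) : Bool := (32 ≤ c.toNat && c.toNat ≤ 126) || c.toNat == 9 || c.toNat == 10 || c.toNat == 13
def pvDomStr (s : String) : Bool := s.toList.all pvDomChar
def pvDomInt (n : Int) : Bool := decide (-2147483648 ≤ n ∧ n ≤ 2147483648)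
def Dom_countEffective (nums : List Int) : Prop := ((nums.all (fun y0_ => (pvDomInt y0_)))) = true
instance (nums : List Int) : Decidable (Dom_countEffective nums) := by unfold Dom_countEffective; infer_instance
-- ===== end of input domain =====

-- B replaces A's per-subset union of index sets by one precomputed bitmask per element and a
-- per-subset count of elements whose bitmask meets the subset (objective: faster, constant-factor).

-- shared low-level helper: the Python expression `(x >> b) & 1` (b is nonnegative at every use site)
def tb (x b : Int) : Int := PySem.Int.band (x >>> b.toNat) 1

-- ===== PORT A =====
def pvFullOr (nums : List Int) : Int := nums.foldl (fun acc num => PySem.Int.bor acc num) 0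

-- `for i in range(20): if (full_or >> i) & 1: bit2indices[i] = []`
def pvBitDict (orv : Int) : PySem.Dict Int (List Int) :=
  (PySem.List.pyRange 0 20 1).foldl
    (fun d i => if tb orv i ≠ 0 then d.insert i ([] : List Int) else d) PySem.Dict.empty

-- body of `for idx, num in enumerate(nums)`: `for b in bit2indices: if (num >> b) & 1: …append(idx)`
def pvFillStep (d : PySem.Dict Int (List Int)) (p : Int × Int) : PySem.Dict Int (List Int) :=
  d.keys.foldl (fun d' b => if tb p.2 b ≠ 0 then d'.modify b [] (fun l => l ++ [p.1]) else d') d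

def pvFill (d0 : PySem.Dict Int (List Int)) (nums : List Int) : PySem.Dict Int (List Int) :=
  (PySem.List.enumerate nums).foldl pvFillStep d0

-- `covered = set(); for j in range(m): if (mask >> j) & 1: covered |= set(bit2indices[bits[j]])`
def pvCovered (d1 : PySem.Dict Int (List Int)) (bits : List Int) (m : Nat) (mask : Int) :
    PySem.Set Int :=
  (PySem.List.pyRange 0 (m : Int) 1).foldl
    (fun cov j =>
      if tb mask j ≠ 0 then
        PySem.Set.union cov (PySem.Set.ofList (d1.getD (PySem.List.pyGetD bits j 0) []))
      else cov)
    PySem.Set.empty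

def countEffective (nums : List Int) : Int :=
  let M : Int := 1000000007
  let d1 := pvFill (pvBitDict (pvFullOr nums)) nums
  let bits := d1.keys
  let m := bits.length
  (PySem.List.pyRange 1 ((1 : Int) <<< m) 1).foldl
    (fun ans mask =>
      let cnt : Int := PySem.Int.powMod 2 (pvCovered d1 bits m mask).length M - 1
      if PySem.Int.bitCount mask % 2 = 1 then PySem.Int.mod (ans + cnt) M
      else PySem.Int.mod (ans - cnt) M) 0

-- ===== PORT B =====
-- `bits = [b for b in range(20) if (full_or >> b) & 1]`
def pvBitsB (orv : Int) : List Int :=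
  (PySem.List.pyRange 0 20 1).filter (fun b => tb orv b != 0)

-- `sum(((num >> b) & 1) << j for j, b in enumerate(bits))`
def pvMaskOf (bits : List Int) (num : Int) : Int :=
  ((PySem.List.enumerate bits).map (fun jb => tb num jb.2 <<< jb.1.toNat)).sum

def countEffective_alt (nums : List Int) : Int :=
  let M : Int := 1000000007
  let bits := pvBitsB (pvFullOr nums)
  let m := bits.length
  let masks := nums.map (pvMaskOf bits)
  let ans := (PySem.List.pyRange 1 ((1 : Int) <<< m) 1).foldl
    (fun ans sub =>
      let term : Int :=
        PySem.Int.powMod 2 (masks.filter (fun mu => PySem.Int.band mu sub != 0)).length M - 1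
      if PySem.Int.bitCount sub % 2 = 1 then ans + term else ans - term) 0
  PySem.Int.mod ans M

-- ===== PRECONDITION & SPEC =====
def Spec_countEffective (nums : List Int) (out : Int) : Prop := out = countEffective_alt nums
instance (nums : List Int) (out : Int) : Decidable (Spec_countEffective nums out) := by
  unfold Spec_countEffective; infer_instance

-- ===== CLAIM (what is proved, stated in full; the proofs are below) =====
def Claim_equal_countEffective : Prop :=
  ∀ (nums : List Int), Dom_countEffective nums → Spec_countEffective nums (countEffective nums)

-- ===== LEMMAS AND PROOFS =====

lemma tb_cases (x b : Int) : tb x b = 0 ∨ tb x b = 1 := by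
  have h := PySem.Int.band_one (x >>> b.toNat)
  have h0 := PySem.Int.mod_nonneg (x >>> b.toNat) (b := 2) (by norm_num)
  have h1 := PySem.Int.mod_lt (x >>> b.toNat) (b := 2) (by norm_num)
  unfold tb; omega

lemma pvBitDict_items (orv : Int) :
    (pvBitDict orv).items = (pvBitsB orv).map (fun i => (i, ([] : List Int))) := by
  unfold pvBitDict pvBitsB
  rw [PySem.List.foldl_ite_eq_foldl_filter (p := fun i => tb orv i ≠ 0)
      (f := fun (d : PySem.Dict Int (List Int)) i => d.insert i ([] : List Int))]
  rw [PySem.Dict.items_foldl_insert_fresh _ (fun a => a) (fun _ => ([] : List Int)) _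
      (by intro a _; simp [PySem.Dict.contains_empty])
      (by simpa using (PySem.List.nodup_pyRange_one 0 20).filter _)]
  have hp : (fun x : Int => !decide (tb orv x = 0)) = (fun b : Int => tb orv b != 0) := by
    funext b; by_cases h : tb orv b = 0 <;> simp [bne, h]
  simp [PySem.Dict.empty, hp]

lemma pvBitsB_nodup (orv : Int) : (pvBitsB orv).Nodup :=
  (PySem.List.nodup_pyRange_one 0 20).filter _

lemma pvBitDict_keys (orv : Int) : (pvBitDict orv).keys = pvBitsB orv := by
  show (pvBitDict orv).items.map (·.1) = _
  rw [pvBitDict_items]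
  simp [List.map_map, Function.comp_def]

lemma pvBitDict_getD (orv : Int) (b : Int) (hb : b ∈ (pvBitDict orv).keys) :
    (pvBitDict orv).getD b [] = [] := by
  apply PySem.Dict.getD_of_mem_items
  · rw [pvBitDict_items]
    rw [pvBitDict_keys] at hb
    simpa using hb
  · rw [pvBitDict_keys]; exact pvBitsB_nodup orv

-- a pass `for b in L: if c(b): d[b] = g(d.get(b, []))` over distinct keys, read back at one key
lemma foldl_modifyIf_getD (g : List Int → List Int) (c : Int → Prop) [DecidablePred c]
    (L : List Int) (hL : L.Nodup) (d : PySem.Dict Int (List Int)) (b : Int) :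
    (L.foldl (fun d' k => if c k then d'.modify k [] g else d') d).getD b [] =
      if b ∈ L ∧ c b then g (d.getD b []) else d.getD b [] := by
  induction L generalizing d with
  | nil => simp
  | cons a L ih =>
    simp only [List.foldl_cons]
    rw [ih (hL.of_cons)]
    by_cases hba : b = a
    · subst hba
      have hbL : b ∉ L := (List.nodup_cons.mp hL).1
      by_cases hc : c b
      · simp [hc, hbL, PySem.Dict.getD_modify]
      · simp [hc, hbL]
    · by_cases hca : c a
      · simp [hca, PySem.Dict.getD_modify, hba, List.mem_cons]
      · simp [hca, List.mem_cons, hba]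

lemma foldl_modifyIf_keys (g : List Int → List Int) (c : Int → Prop) [DecidablePred c]
    (L : List Int) (d : PySem.Dict Int (List Int)) (h : ∀ b ∈ L, b ∈ d.keys) :
    (L.foldl (fun d' k => if c k then d'.modify k [] g else d') d).keys = d.keys := by
  induction L generalizing d with
  | nil => simp
  | cons a L ih =>
    simp only [List.foldl_cons]
    have ha : a ∈ d.keys := h a (by simp)
    have hk : (if c a then d.modify a [] g else d).keys = d.keys := by
      by_cases hca : c a
      · simp only [hca, if_pos]
        rw [PySem.Dict.keys_modify]
        exact PySem.Dict.keys_insert_of_contains _ _ ((PySem.Dict.contains_iff_mem_keys _ _).mpr ha)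
      · simp [hca]
    rw [ih _ (by intro b hb; rw [hk]; exact h b (List.mem_cons_of_mem _ hb)), hk]

lemma pvFillStep_keys (d : PySem.Dict Int (List Int)) (p : Int × Int) :
    (pvFillStep d p).keys = d.keys := by
  unfold pvFillStep
  exact foldl_modifyIf_keys _ _ _ _ (fun b hb => hb)

lemma pvFill_keys_aux (l : List (Int × Int)) (d : PySem.Dict Int (List Int)) :
    (l.foldl pvFillStep d).keys = d.keys := by
  induction l generalizing d with
  | nil => rfl
  | cons p l ih => rw [List.foldl_cons, ih, pvFillStep_keys]

lemma pvFill_getD_aux (l : List (Int × Int)) (d : PySem.Dict Int (List Int))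
    (hnd : d.keys.Nodup) (b : Int) (hb : b ∈ d.keys) :
    (l.foldl pvFillStep d).getD b [] =
      d.getD b [] ++ (l.filter (fun p => decide (tb p.2 b ≠ 0))).map (·.1) := by
  induction l generalizing d with
  | nil => simp
  | cons p l ih =>
    rw [List.foldl_cons]
    have hk : (pvFillStep d p).keys = d.keys := pvFillStep_keys d p
    rw [ih _ (hk ▸ hnd) (hk ▸ hb)]
    have hstep : (pvFillStep d p).getD b [] =
        if tb p.2 b ≠ 0 then d.getD b [] ++ [p.1] else d.getD b [] := by
      unfold pvFillStep
      rw [foldl_modifyIf_getD _ _ _ hnd]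
      simp [hb]
    rw [hstep]
    by_cases hc : tb p.2 b ≠ 0
    · simp [hc, List.filter_cons]
    · simp [List.filter_cons, hc]

-- the index list a key of the filled dict holds
def pvIdxList (nums : List Int) (b : Int) : List Int :=
  ((PySem.List.enumerate nums).filter (fun p => decide (tb p.2 b ≠ 0))).map (·.1)

lemma pvFill_getD (orv : Int) (nums : List Int) (b : Int) (hb : b ∈ (pvBitDict orv).keys) :
    (pvFill (pvBitDict orv) nums).getD b [] = pvIdxList nums b := by
  unfold pvFill pvIdxList
  rw [pvFill_getD_aux _ _ (by rw [pvBitDict_keys]; exact pvBitsB_nodup orv) _ hb,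
      pvBitDict_getD orv b hb]
  simp

lemma enumFilterMap_mem (nums : List Int) (pred : Int × Int → Bool) (x : Int) :
    x ∈ ((PySem.List.enumerate nums).filter pred).map (·.1) ↔
      ∃ k : Nat, ∃ _ : k < nums.length, x = (k : Int) ∧ pred ((k : Int), nums[k]) = true := by
  simp only [List.mem_map, List.mem_filter, PySem.List.mem_enumerate_iff]
  constructor
  · rintro ⟨p, ⟨⟨k, hk, rfl⟩, hp⟩, rfl⟩
    refine ⟨k, hk, by simp, by simpa using hp⟩
  · rintro ⟨k, hk, rfl, hp⟩
    exact ⟨((k : Int), nums[k]), ⟨⟨k, hk, by simp⟩, hp⟩, rfl⟩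

lemma enumFilterMap_nodup (nums : List Int) (pred : Int × Int → Bool) :
    (((PySem.List.enumerate nums).filter pred).map (·.1)).Nodup := by
  have h1 : (((PySem.List.enumerate nums).filter pred)).Pairwise (fun p q => p.1 < q.1) :=
    (PySem.List.pairwise_lt_enumerate nums 0).filter pred
  exact (List.pairwise_map (f := fun (p : Int × Int) => p.1)
      (R := fun a b : Int => a ≠ b)).mpr (h1.imp (fun h => ne_of_lt h))

lemma covered_fold_spec (q : Int → Prop) [DecidablePred q] (F : Int → List Int)
    (js : List Int) (s : PySem.Set Int) (hs : s.Nodup) :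
    (js.foldl (fun cov j => if q j then PySem.Set.union cov (PySem.Set.ofList (F j)) else cov)
        s).Nodup ∧
    ∀ x, x ∈ js.foldl (fun cov j => if q j then PySem.Set.union cov (PySem.Set.ofList (F j)) else cov) s ↔
      x ∈ s ∨ ∃ j ∈ js, q j ∧ x ∈ F j := by
  induction js generalizing s with
  | nil => simpa using hs
  | cons a js ih =>
    simp only [List.foldl_cons]
    have hs' : (if q a then PySem.Set.union s (PySem.Set.ofList (F a)) else s).Nodup := by
      by_cases hq : q a
      · simpa [hq] using PySem.Set.nodup_union _ _ hs
      · simpa [hq] using hs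
    obtain ⟨h1, h2⟩ := ih _ hs'
    refine ⟨h1, fun x => ?_⟩
    rw [h2]
    by_cases hq : q a
    · simp [hq, PySem.Set.mem_union, or_assoc]
    · simp [hq]

-- the per-element bitmask written in binary, little-endian over `bits`
def pvNM (num : Int) : List Int → Nat
  | [] => 0
  | b :: L => (if tb num b ≠ 0 then 1 else 0) + 2 * pvNM num L

lemma pvMaskOf_enum_sum (num : Int) (L : List Int) (s : Nat) :
    ((PySem.List.enumerate L (s : Int)).map (fun jb => tb num jb.2 <<< jb.1.toNat)).sum =
      (pvNM num L : Int) * 2 ^ s := by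
  induction L generalizing s with
  | nil => simp [PySem.List.enumerate_nil, pvNM]
  | cons b L ih =>
    rw [PySem.List.enumerate_cons]
    have hcast : ((s : Int) + 1) = ((s + 1 : Nat) : Int) := by push_cast; ring
    simp only [List.map_cons, List.sum_cons, hcast, ih]
    have ht : tb num b <<< (((((s : Int))).toNat : Nat) : Int) = tb num b * 2 ^ s := by
      rw [Int.toNat_natCast, Int.shiftLeft_eq_mul_pow]; push_cast; ring
    rw [ht]
    rcases tb_cases num b with h | h <;>
      simp [pvNM, h] <;> push_cast <;> ring

lemma pvMaskOf_eq (bits : List Int) (num : Int) : pvMaskOf bits num = (pvNM num bits : Int) := by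
  have := pvMaskOf_enum_sum num bits 0
  simpa [pvMaskOf] using this

lemma pvNM_testBit (num : Int) (L : List Int) (i : Nat) :
    (pvNM num L).testBit i = if h : i < L.length then decide (tb num L[i] ≠ 0) else false := by
  induction L generalizing i with
  | nil => simp [pvNM]
  | cons b L ih =>
    cases i with
    | zero =>
      rw [Nat.testBit_zero]
      rcases tb_cases num b with h | h <;> simp [pvNM, h, Nat.add_mul_mod_self_left]
    | succ i =>
      rw [Nat.testBit_add_one]
      have hdiv : pvNM num (b :: L) / 2 = pvNM num L := by
        rcases tb_cases num b with h | h <;> simp [pvNM, h] <;> omega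
      rw [hdiv, ih]
      simp [Nat.succ_lt_succ_iff]

lemma land_ne_zero_iff (a b : Nat) : (a &&& b) ≠ 0 ↔ ∃ i, a.testBit i ∧ b.testBit i := by
  constructor
  · intro h
    obtain ⟨i, hi⟩ := Nat.exists_testBit_of_ne_zero h
    exact ⟨i, by simpa [Nat.testBit_land, Bool.and_eq_true] using hi⟩
  · rintro ⟨i, h1, h2⟩ h0
    have := Nat.zero_testBit i
    rw [← h0] at this
    simp [Nat.testBit_land, h1, h2] at this

lemma tb_toNat_testBit (x : Int) (hx : 0 ≤ x) (j : Nat) :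
    tb x (j : Int) ≠ 0 ↔ x.toNat.testBit j := by
  unfold tb
  rw [Int.toNat_natCast]
  conv_lhs => rw [← Int.toNat_of_nonneg hx]
  rw [← Int.natCast_shiftRight]
  have h1 : (1 : Int) = ((1 : Nat) : Int) := rfl
  rw [h1, PySem.Int.band_natCast]
  rw [Nat.and_one_is_mod, Nat.shiftRight_eq_div_pow, Nat.testBit_eq_decide_div_mod_eq]
  constructor
  · intro h
    have h2 : (x.toNat / 2 ^ j) % 2 ≠ 0 := by exact_mod_cast h
    simp only [decide_eq_true_eq]; omega
  · intro h
    simp only [decide_eq_true_eq] at h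
    intro hc
    have h2 : (x.toNat / 2 ^ j) % 2 = 0 := by exact_mod_cast hc
    omega

lemma band_maskOf_iff (bits : List Int) (num sub : Int) (hsub : 0 ≤ sub) :
    PySem.Int.band (pvMaskOf bits num) sub ≠ 0 ↔
      ∃ j : Nat, ∃ _ : j < bits.length, tb sub (j : Int) ≠ 0 ∧ tb num bits[j] ≠ 0 := by
  rw [pvMaskOf_eq]
  rw [PySem.Int.band_of_nonneg (by positivity) hsub]
  have hcast : ((pvNM num bits : Int)).toNat = pvNM num bits := Int.toNat_natCast _
  rw [hcast]
  constructor
  · intro h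
    have hne : (pvNM num bits &&& sub.toNat) ≠ 0 := by
      intro h0; rw [h0] at h; simp at h
    obtain ⟨i, h1, h2⟩ := (land_ne_zero_iff _ _).mp hne
    rw [pvNM_testBit] at h1
    by_cases hi : i < bits.length
    · rw [dif_pos hi] at h1
      exact ⟨i, hi, (tb_toNat_testBit sub hsub i).mpr h2, by simpa using h1⟩
    · rw [dif_neg hi] at h1; exact absurd h1 (by simp)
  · rintro ⟨j, hj, h1, h2⟩
    have : (pvNM num bits &&& sub.toNat) ≠ 0 := by
      apply (land_ne_zero_iff _ _).mpr
      refine ⟨j, ?_, (tb_toNat_testBit sub hsub j).mp h1⟩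
      rw [pvNM_testBit, dif_pos hj]; simpa using h2
    exact_mod_cast this

lemma count_eq (nums : List Int) (mask : Int) (h1 : 1 ≤ mask) :
    (pvCovered (pvFill (pvBitDict (pvFullOr nums)) nums)
        (pvFill (pvBitDict (pvFullOr nums)) nums).keys
        (pvFill (pvBitDict (pvFullOr nums)) nums).keys.length mask).length =
      ((nums.map (pvMaskOf (pvBitsB (pvFullOr nums)))).filter
        (fun mu => PySem.Int.band mu mask != 0)).length := by
  set orv := pvFullOr nums with horv
  set d1 := pvFill (pvBitDict orv) nums with hd1
  have hkeys : d1.keys = pvBitsB orv := by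
    rw [hd1]; unfold pvFill; rw [pvFill_keys_aux, pvBitDict_keys]
  set bits := d1.keys with hbits
  rw [← hkeys]
  have hmask0 : (0 : Int) ≤ mask := by omega
  have hcov := covered_fold_spec (fun j => tb mask j ≠ 0)
      (fun j => d1.getD (PySem.List.pyGetD bits j 0) [])
      (PySem.List.pyRange 0 (bits.length : Int) 1) PySem.Set.empty (by simp [PySem.Set.empty])
  obtain ⟨hnd, hmem⟩ := hcov
  set W := ((PySem.List.enumerate nums).filter
      (fun p => decide (PySem.Int.band (pvMaskOf bits p.2) mask ≠ 0))).map (·.1) with hW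
  have hWnd : W.Nodup := enumFilterMap_nodup _ _
  have hgetb : ∀ b : Int, b ∈ bits → d1.getD b [] = pvIdxList nums b := by
    intro b hb
    rw [hd1]
    exact pvFill_getD orv nums b (by rw [pvBitDict_keys, ← hkeys]; exact hb)
  have hiff : ∀ x, x ∈ pvCovered d1 bits bits.length mask ↔ x ∈ W := by
    intro x
    rw [hW, enumFilterMap_mem]
    unfold pvCovered
    rw [hmem x]
    simp only [PySem.Set.empty, List.not_mem_nil, false_or]
    constructor
    · rintro ⟨j, hjr, hq, hx⟩
      rw [PySem.List.mem_pyRange_one] at hjr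
      obtain ⟨hj0, hjm⟩ := hjr
      set jn := j.toNat with hjn
      have hjcast : (jn : Int) = j := Int.toNat_of_nonneg hj0
      have hjlt : jn < bits.length := by omega
      have hget : PySem.List.pyGetD bits j 0 = bits[jn] := by
        rw [← hjcast, PySem.List.pyGetD_natCast, List.getD_eq_getElem _ _ hjlt]
      rw [hget, hgetb _ (List.getElem_mem hjlt)] at hx
      unfold pvIdxList at hx
      rw [enumFilterMap_mem] at hx
      obtain ⟨k, hk, rfl, hpred⟩ := hx
      refine ⟨k, hk, rfl, ?_⟩
      simp only [decide_eq_true_eq] at hpred ⊢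
      rw [band_maskOf_iff _ _ _ hmask0]
      refine ⟨jn, hjlt, ?_, by simpa using hpred⟩
      rw [hjcast]; exact hq
    · rintro ⟨k, hk, rfl, hpred⟩
      simp only [decide_eq_true_eq] at hpred
      rw [band_maskOf_iff _ _ _ hmask0] at hpred
      obtain ⟨j, hj, hqj, hbj⟩ := hpred
      refine ⟨(j : Int), ?_, by simpa using hqj, ?_⟩
      · rw [PySem.List.mem_pyRange_one]
        constructor
        · positivity
        · exact_mod_cast hj
      · have hget : PySem.List.pyGetD bits (j : Int) 0 = bits[j] := by
          rw [PySem.List.pyGetD_natCast, List.getD_eq_getElem _ _ hj]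
        rw [hget, hgetb _ (List.getElem_mem hj)]
        unfold pvIdxList
        rw [enumFilterMap_mem]
        exact ⟨k, hk, rfl, by simpa using hbj⟩
  have hperm : (pvCovered d1 bits bits.length mask).Perm W :=
    (List.perm_ext_iff_of_nodup (by unfold pvCovered; exact hnd) hWnd).mpr hiff
  rw [hperm.length_eq, hW, List.length_map]
  rw [← List.countP_eq_length_filter, ← List.countP_eq_length_filter]
  rw [List.countP_map]
  conv_rhs => rw [← PySem.List.map_snd_enumerate nums 0, List.countP_map]
  congr 1
  funext p
  by_cases h : PySem.Int.band (pvMaskOf bits p.2) mask = 0 <;> simp [bne, h, Function.comp]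

lemma foldl_mod_eq (M : Int) (hM : 0 < M) (tA tB : Int → Int) (p : Int → Prop) [DecidablePred p]
    (l : List Int) (a : Int) (h : ∀ x ∈ l, tA x = tB x) :
    l.foldl (fun ans x => if p x then PySem.Int.mod (ans + tA x) M
      else PySem.Int.mod (ans - tA x) M) (PySem.Int.mod a M) =
    PySem.Int.mod (l.foldl (fun ans x => if p x then ans + tB x else ans - tB x) a) M := by
  induction l generalizing a with
  | nil => simp
  | cons x l ih =>
    simp only [List.foldl_cons]
    have hx : tA x = tB x := h x (by simp)
    have hrest : ∀ y ∈ l, tA y = tB y := fun y hy => h y (List.mem_cons_of_mem _ hy)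
    by_cases hp : p x
    · simp only [hp, if_pos]
      rw [← ih (a + tB x) hrest]
      congr 1
      rw [hx, PySem.Int.mod_eq_emod_of_pos hM, PySem.Int.mod_eq_emod_of_pos hM,
          PySem.Int.mod_eq_emod_of_pos hM, Int.emod_add_emod]
    · simp only [hp, if_neg, not_false_iff]
      rw [← ih (a - tB x) hrest]
      congr 1
      rw [hx, PySem.Int.mod_eq_emod_of_pos hM, PySem.Int.mod_eq_emod_of_pos hM,
          PySem.Int.mod_eq_emod_of_pos hM]
      rw [Int.sub_emod, Int.emod_emod_of_dvd _ dvd_rfl, ← Int.sub_emod]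

-- ===== VERDICT (by name: the statement is the Claim_ definition above) =====
theorem countEffective_spec : Claim_equal_countEffective := by
  unfold Claim_equal_countEffective Spec_countEffective
  intro nums _
  show countEffective nums = countEffective_alt nums
  simp only [countEffective, countEffective_alt]
  have hkeys : (pvFill (pvBitDict (pvFullOr nums)) nums).keys = pvBitsB (pvFullOr nums) := by
    unfold pvFill; rw [pvFill_keys_aux, pvBitDict_keys]
  rw [hkeys]
  have key := foldl_mod_eq 1000000007 (by norm_num)
      (fun mask => PySem.Int.powMod 2
        (pvCovered (pvFill (pvBitDict (pvFullOr nums)) nums) (pvBitsB (pvFullOr nums))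
          (pvBitsB (pvFullOr nums)).length mask).length 1000000007 - 1)
      (fun mask => PySem.Int.powMod 2
        ((nums.map (pvMaskOf (pvBitsB (pvFullOr nums)))).filter
          (fun mu => PySem.Int.band mu mask != 0)).length 1000000007 - 1)
      (fun mask => PySem.Int.bitCount mask % 2 = 1)
      (PySem.List.pyRange 1 ((1 : Int) <<< (pvBitsB (pvFullOr nums)).length) 1) 0
      (by
        intro x hx
        rw [PySem.List.mem_pyRange_one] at hx
        have h := count_eq nums x hx.1
        rw [hkeys] at h
        simp only [h])
  rw [show PySem.Int.mod (0 : Int) 1000000007 = 0 from by decide] at key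
  exact key
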